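-- pv_equiv track=rewrite | github.com/GOTWIC/S2-Demo-Paper-Code | prompt_logs/tester.py | convert_numbers_to_ascii
-- ===== SOURCE A (Python) =====
-- def convert_numbers_to_ascii(input_string):
--     result = ""
--     current_numbers = ""
--
--     for char in input_string:
--         if char.isdigit():
--             current_numbers += char
--             if len(current_numbers) == 3:
--                 ascii_value = int(current_numbers)
--                 if ascii_value == 999:
--                     result += " "
--                 else:
--                     result += chr(ascii_value)
--                 current_numbers = ""
--         else:
--             # Non-digit character, append current_numbers if any
--             if current_numbers:
--                 result += chr(int(current_numbers))
--                 current_numbers = ""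
--             result += char
--
--     # Append any remaining numbers
--     if current_numbers:
--         result += chr(int(current_numbers))
--
--     return result
-- ===== SOURCE B (Python) =====
-- def convert_numbers_to_ascii(input_string):
--     out = []
--     i = 0
--     n = len(input_string)
--     while i < n:
--         if input_string[i].isdigit():
--             j = i
--             while j < n and input_string[j].isdigit():
--                 j += 1
--             run = input_string[i:j]
--             k = 0
--             while k + 3 <= len(run):
--                 v = int(run[k:k + 3])
--                 out.append(" " if v == 999 else chr(v))
--                 k += 3
--             if k < len(run):
--                 out.append(chr(int(run[k:])))
--             i = j
--         else:
--             out.append(input_string[i])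
--             i += 1
--     return "".join(out)
-- ===== Notes on version B (the rewrite author's own statement) =====
-- stated objective: idiomatic
-- what changed: B tokenizes the string into maximal digit-runs and single non-digit characters, decodes each run by slicing it into 3-digit chunks (999->space) plus a 1-2 digit remainder, and joins the pieces, instead of A's single character-by-character loop with a pending-digits accumulator and string concatenation.
import Mathlib
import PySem

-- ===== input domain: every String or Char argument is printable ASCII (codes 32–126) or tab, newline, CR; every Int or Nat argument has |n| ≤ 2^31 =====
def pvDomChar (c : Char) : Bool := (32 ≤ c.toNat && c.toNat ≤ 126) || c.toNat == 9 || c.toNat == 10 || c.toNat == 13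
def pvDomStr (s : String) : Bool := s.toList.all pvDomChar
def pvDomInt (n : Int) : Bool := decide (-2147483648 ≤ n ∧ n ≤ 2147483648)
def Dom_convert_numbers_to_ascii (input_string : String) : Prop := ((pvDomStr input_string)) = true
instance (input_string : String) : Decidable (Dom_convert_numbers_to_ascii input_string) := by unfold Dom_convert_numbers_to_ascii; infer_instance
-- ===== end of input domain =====

-- B decodes the string one maximal digit-run at a time (3-digit chunks, 999->space, 1-2 digit remainder)
-- instead of A's char-by-char loop with a pending accumulator; objective: a more idiomatic decomposition, same cost.


-- shared primitive: int(<digit string>) (exact for nonempty all-digit ASCII strings, the only use here)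
def pvIntOfDigits (cs : List Char) : Nat := cs.foldl (fun a c => 10 * a + (c.toNat - 48)) 0

-- ===== PORT A =====
-- loop body of A's for-loop; state = (result, current_numbers), both as List Char
def pvAStep (st : List Char × List Char) (ch : Char) : List Char × List Char :=
  if ch.isDigit then
    let cur := st.2 ++ [ch]
    if cur.length = 3 then
      let v := pvIntOfDigits cur
      (st.1 ++ (if v = 999 then [' '] else [Char.ofNat v]), [])
    else (st.1, cur)
  else
    ((if st.2 ≠ [] then st.1 ++ [Char.ofNat (pvIntOfDigits st.2)] else st.1) ++ [ch], [])

def convert_numbers_to_ascii (input_string : String) : String :=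
  let st := input_string.toList.foldl pvAStep ([], [])
  String.ofList (if st.2 ≠ [] then st.1 ++ [Char.ofNat (pvIntOfDigits st.2)] else st.1)

-- ===== PORT B =====
-- decode one maximal digit-run: consecutive 3-digit chunks (999 -> space), then the 1-2 digit remainder
def pvDecodeRun : List Char → List Char
  | a :: b :: c :: rest =>
      (if pvIntOfDigits [a, b, c] = 999 then ' ' else Char.ofNat (pvIntOfDigits [a, b, c]))
        :: pvDecodeRun rest
  | [] => []
  | rem => [Char.ofNat (pvIntOfDigits rem)]

-- B's outer loop: scan for the next maximal digit-run or copy the non-digit character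
def pvAltGo : List Char → List Char
  | [] => []
  | c :: rest =>
    if c.isDigit then
      pvDecodeRun (c :: rest.takeWhile Char.isDigit) ++ pvAltGo (rest.dropWhile Char.isDigit)
    else c :: pvAltGo rest
termination_by cs => cs.length
decreasing_by
  · simpa using Nat.lt_succ_of_le (List.length_dropWhile_le _ _)
  · simp

def convert_numbers_to_ascii_alt (input_string : String) : String :=
  String.ofList (pvAltGo input_string.toList)

-- ===== PRECONDITION & SPEC =====
def Spec_convert_numbers_to_ascii (input_string : String) (out : String) : Prop := out = convert_numbers_to_ascii_alt input_string
instance (input_string : String) (out : String) : Decidable (Spec_convert_numbers_to_ascii input_string out) := by unfold Spec_convert_numbers_to_ascii; infer_instance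

-- ===== CLAIM (what is proved, stated in full; the proofs are below) =====
def Claim_equal_convert_numbers_to_ascii : Prop := ∀ (input_string : String), Dom_convert_numbers_to_ascii input_string → Spec_convert_numbers_to_ascii input_string (convert_numbers_to_ascii input_string)

-- ===== LEMMAS AND PROOFS =====

-- the fully decoded triples of a run, and the pending 0-2 digit leftover A would keep
def pvFull : List Char → List Char
  | a :: b :: c :: rest =>
      (if pvIntOfDigits [a, b, c] = 999 then ' ' else Char.ofNat (pvIntOfDigits [a, b, c]))
        :: pvFull rest
  | _ => []

def pvLeft : List Char → List Char
  | _ :: _ :: _ :: rest => pvLeft rest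
  | rem => rem

def pvFlush (l : List Char) : List Char :=
  if l ≠ [] then [Char.ofNat (pvIntOfDigits l)] else []

lemma pvDecodeRun_eq (run : List Char) :
    pvDecodeRun run = pvFull run ++ pvFlush (pvLeft run) := by
  fun_induction pvDecodeRun run <;> simp_all [pvFull, pvLeft, pvFlush]

lemma step3 (a b c : Char) (ha : a.isDigit = true) (hb : b.isDigit = true)
    (hc : c.isDigit = true) (rest res : List Char) :
    (a :: b :: c :: rest).foldl pvAStep (res, []) =
      rest.foldl pvAStep
        (res ++ (if pvIntOfDigits [a, b, c] = 999 then [' ']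
                 else [Char.ofNat (pvIntOfDigits [a, b, c])]), []) := by
  simp [pvAStep, ha, hb, hc]

lemma run_lemma : ∀ (n : ℕ) (run : List Char), run.length ≤ n →
    (∀ x ∈ run, x.isDigit = true) → ∀ res,
    run.foldl pvAStep (res, []) = (res ++ pvFull run, pvLeft run) := by
  intro n
  induction n with
  | zero =>
      intro run h _ res
      simp at h
      simp [h, pvFull, pvLeft]
  | succ n ih =>
      intro run hlen h res
      match run with
      | [] => simp [pvFull, pvLeft]
      | [a] =>
          have ha : a.isDigit = true := h a (by simp)
          simp [pvAStep, ha, pvFull, pvLeft]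
      | [a, b] =>
          have ha : a.isDigit = true := h a (by simp)
          have hb : b.isDigit = true := h b (by simp)
          simp [pvAStep, ha, hb, pvFull, pvLeft]
      | a :: b :: c :: rest =>
          have ha : a.isDigit = true := h a (by simp)
          have hb : b.isDigit = true := h b (by simp)
          have hc : c.isDigit = true := h c (by simp)
          have hrest : ∀ x ∈ rest, x.isDigit = true := fun x hx => h x (by simp [hx])
          have hrl : rest.length ≤ n := by simp at hlen; omega
          rw [step3 a b c ha hb hc rest res, ih rest hrl hrest]
          simp only [pvFull, pvLeft]
          split <;> simp

lemma finalize_eq (res l : List Char) :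
    (if l ≠ [] then res ++ [Char.ofNat (pvIntOfDigits l)] else res) = res ++ pvFlush l := by
  by_cases h : l = [] <;> simp [pvFlush, h]

lemma head_dropWhile_not (p : Char → Bool) (l : List Char) (x : Char) (xs : List Char)
    (h : l.dropWhile p = x :: xs) : p x = false := by
  induction l with
  | nil => simp at h
  | cons a t ih =>
      by_cases hp : p a = true
      · rw [List.dropWhile_cons_of_pos hp] at h; exact ih h
      · rw [List.dropWhile_cons_of_neg (by simpa using hp)] at h
        cases h; simpa using hp

lemma main_lemma : ∀ n cs, cs.length ≤ n → ∀ res,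
    (let st := cs.foldl pvAStep (res, []);
     if st.2 ≠ [] then st.1 ++ [Char.ofNat (pvIntOfDigits st.2)] else st.1)
      = res ++ pvAltGo cs := by
  intro n
  induction n with
  | zero => intro cs h res; simp at h; simp [h, pvAltGo]
  | succ n ih =>
      intro cs hlen res
      match cs with
      | [] => simp [pvAltGo]
      | c :: rest =>
        by_cases hc : c.isDigit = true
        · have hsplit : rest = rest.takeWhile Char.isDigit ++ rest.dropWhile Char.isDigit :=
            (List.takeWhile_append_dropWhile).symm
          set t := rest.takeWhile Char.isDigit with ht
          set d := rest.dropWhile Char.isDigit with hd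
          have hrun : ∀ x ∈ c :: t, x.isDigit = true := by
            intro x hx
            rcases hx with _ | hx
            · exact hc
            · exact List.mem_takeWhile_imp (by assumption)
          have hct : (c :: t).length ≤ n + 1 := by
            have := congrArg List.length hsplit
            simp only [List.length_append] at this
            simp only [List.length_cons] at hlen ⊢
            omega
          have hfold : (c :: rest).foldl pvAStep (res, []) =
              d.foldl pvAStep (res ++ pvFull (c :: t), pvLeft (c :: t)) := by
            conv_lhs => rw [show (c :: rest) = (c :: t) ++ d from by rw [hsplit]; rfl]
            rw [List.foldl_append, run_lemma (c :: t).length (c :: t) le_rfl hrun]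
          have haltgo : pvAltGo (c :: rest) = pvDecodeRun (c :: t) ++ pvAltGo d := by
            simp only [pvAltGo, hc, if_true, ← ht, ← hd]
          have hdlen : d.length ≤ rest.length := by
            rw [hd]; exact List.length_dropWhile_le _ _
          cases hdd : d with
          | nil =>
              simp only [hfold, hdd, List.foldl_nil]
              rw [finalize_eq, haltgo, pvDecodeRun_eq]
              simp [hdd, pvAltGo]
          | cons x d' =>
              have hx : x.isDigit = false := head_dropWhile_not _ rest x d' (hd.symm.trans hdd)
              have hstep : pvAStep (res ++ pvFull (c :: t), pvLeft (c :: t)) x =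
                  (res ++ pvDecodeRun (c :: t) ++ [x], []) := by
                simp only [pvAStep, hx, Bool.false_eq_true, if_false]
                rw [finalize_eq, pvDecodeRun_eq]
                simp
              have hd'len : d'.length ≤ n := by
                rw [hdd] at hdlen
                simp only [List.length_cons] at hlen hdlen
                omega
              simp only [hfold, hdd, List.foldl_cons, hstep]
              rw [ih d' hd'len]
              rw [haltgo, hdd]
              have : pvAltGo (x :: d') = x :: pvAltGo d' := by
                simp only [pvAltGo, hx]; simp
              rw [this]
              simp
        · have hstep : pvAStep (res, []) c = (res ++ [c], []) := by
            simp [pvAStep, hc]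
          have hrl : rest.length ≤ n := by simp at hlen; omega
          simp only [List.foldl_cons, hstep]
          rw [ih rest hrl]
          have : pvAltGo (c :: rest) = c :: pvAltGo rest := by
            simp only [pvAltGo, hc]; simp
          rw [this]
          simp

-- ===== VERDICT (by name: the statement is the Claim_ definition above) =====
theorem convert_numbers_to_ascii_spec : Claim_equal_convert_numbers_to_ascii := by
  intro s _
  unfold Spec_convert_numbers_to_ascii convert_numbers_to_ascii convert_numbers_to_ascii_alt
  have := main_lemma s.toList.length s.toList le_rfl []
  simp only [List.nil_append] at this
  simp only [this]
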